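-- pv_equiv track=rewrite | github.com/pypi-data/pypi-mirror-318 | packages/eliana/eliana-0.1.7.tar.gz/eliana-0.1.7/src/eliana/preprocessing/log_colorizer.py | common_token
-- ===== SOURCE A (Python) =====
-- def common_token(row, replace):
--     """
--     Re tokenize using common head and tails
--     """
--     list_common_token = []
--     list_raw = row['tokenized event'].split(' ')
--     template = row['template']
--     if template == '':
--         return ''
--     for i, x in zip(range(len(list_raw)), list_raw):
--         if i not in replace[template].keys():
--             list_common_token.append(x)
--         else:
--              list_common_token.append(replace[template][i])
--
--     return ' '.join(list_common_token)
-- ===== SOURCE B (Python) =====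
-- def common_token(row, replace):
--     """
--     Re tokenize using common head and tails
--     """
--     template = row['template']
--     if template == '':
--         return ''
--     tokens = row['tokenized event'].split(' ')
--     n = len(tokens)
--     for i, v in replace[template].items():
--         if 0 <= i < n:
--             tokens[i] = v
--     return ' '.join(tokens)
-- ===== Notes on version B (the rewrite author's own statement) =====
-- stated objective: alternative
-- what changed: B iterates over the replacement dictionary's items and overwrites the affected positions of the split token list in place, instead of scanning every token and testing each index for dict membership; Pre_ requires the row keys and a non-empty template to be present (A raises KeyError otherwise) and, in the Lean model only, that the matched replacement association list has no duplicate index keys (a Python dict cannot hold duplicate keys, so no Python-representable input is excluded by that conjunct).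
import Mathlib
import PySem

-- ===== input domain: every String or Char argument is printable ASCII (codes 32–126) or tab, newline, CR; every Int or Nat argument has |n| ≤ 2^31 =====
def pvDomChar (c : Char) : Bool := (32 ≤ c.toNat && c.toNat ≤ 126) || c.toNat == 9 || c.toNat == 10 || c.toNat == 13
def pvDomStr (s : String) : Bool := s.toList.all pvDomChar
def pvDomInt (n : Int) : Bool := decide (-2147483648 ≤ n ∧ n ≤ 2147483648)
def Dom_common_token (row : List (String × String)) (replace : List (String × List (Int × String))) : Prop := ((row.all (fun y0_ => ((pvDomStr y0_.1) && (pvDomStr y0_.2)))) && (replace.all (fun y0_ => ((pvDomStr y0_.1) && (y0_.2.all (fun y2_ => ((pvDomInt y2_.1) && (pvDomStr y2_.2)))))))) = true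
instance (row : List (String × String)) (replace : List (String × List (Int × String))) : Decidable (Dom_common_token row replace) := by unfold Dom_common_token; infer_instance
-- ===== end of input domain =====

-- B loops over the replacement dict's items and overwrites the affected positions of the split token
-- list in place, instead of scanning every token with a per-token dict-membership test.

-- ===== PORT A =====
-- literal port of A: build list_common_token by appending, token by token
def common_token (row : List (String × String)) (replace : List (String × List (Int × String))) : String :=
  let rowD := PySem.Dict.mk row
  match rowD.get? "tokenized event", rowD.get? "template" with
  | some ev, some template =>
    -- list_raw = row['tokenized event'].split(' ')  (sep is the nonempty literal " ", so split? is always some)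
    let listRaw := (PySem.Str.split? ev " ").getD []
    if template = "" then ""
    else
      match (PySem.Dict.mk replace).get? template with
      | some repl =>
        let replD := PySem.Dict.mk repl
        let listCommon := ((PySem.List.pyRange 0 (listRaw.length : Int) 1).zip listRaw).foldl
          (fun acc ix =>
            if replD.contains ix.1 = false then acc ++ [ix.2]
            else acc ++ [replD.getD ix.1 ""]) []   -- replace[template][i]: present in this branch
        PySem.Str.join " " listCommon
      | none => ""   -- KeyError in Python: excluded by Pre_
  | _, _ => ""       -- KeyError in Python: excluded by Pre_

-- ===== PORT B =====
def common_token_alt (row : List (String × String)) (replace : List (String × List (Int × String))) : String :=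
  let rowD := PySem.Dict.mk row
  match rowD.get? "template" with
  | some template =>
    if template = "" then ""
    else
      match rowD.get? "tokenized event" with
      | none => ""   -- KeyError in Python: excluded by Pre_
      | some ev =>
        match (PySem.Dict.mk replace).get? template with
        | none => ""   -- KeyError in Python: excluded by Pre_
        | some repl =>
          let tokens := (PySem.Str.split? ev " ").getD []
          let n : Int := tokens.length
          let tokens := (PySem.Dict.mk repl).items.foldl
            (fun ts (p : Int × String) => if 0 ≤ p.1 ∧ p.1 < n then ts.set p.1.toNat p.2 else ts) tokens
          PySem.Str.join " " tokens
  | none => ""       -- KeyError in Python: excluded by Pre_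

-- ===== PRECONDITION & SPEC =====
-- Pre_ excludes inputs where A raises KeyError (row missing 'tokenized event' or 'template', or a
-- non-empty template absent from replace), and — a Lean-model corner only — replacement association
-- lists that repeat an index key: a Python dict cannot hold duplicate keys, so that conjunct excludes
-- no Python-representable input on which A returns.
def Pre_common_token (row : List (String × String)) (replace : List (String × List (Int × String))) : Prop :=
  (PySem.Dict.mk row).contains "tokenized event" = true ∧
  (PySem.Dict.mk row).contains "template" = true ∧
  ((PySem.Dict.mk row).getD "template" "" = "" ∨
    ((PySem.Dict.mk replace).contains ((PySem.Dict.mk row).getD "template" "") = true ∧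
     (((PySem.Dict.mk replace).getD ((PySem.Dict.mk row).getD "template" "") []).map Prod.fst).Nodup))
instance (row : List (String × String)) (replace : List (String × List (Int × String))) : Decidable (Pre_common_token row replace) := by unfold Pre_common_token; infer_instance

def pvWitness_common_token : (List (String × String)) × (List (String × List (Int × String))) :=
  ([("tokenized event", "a b c"), ("template", "t")], [("t", [(0, "X"), (5, "Y")])])

def Spec_common_token (row : List (String × String)) (replace : List (String × List (Int × String))) (out : String) : Prop := out = common_token_alt row replace
instance (row : List (String × String)) (replace : List (String × List (Int × String))) (out : String) : Decidable (Spec_common_token row replace out) := by unfold Spec_common_token; infer_instance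

-- ===== CLAIM (what is proved, stated in full; the proofs are below) =====
def Claim_equal_common_token : Prop := ∀ (row : List (String × String)) (replace : List (String × List (Int × String))), Dom_common_token row replace → Pre_common_token row replace → Spec_common_token row replace (common_token row replace)

-- ===== LEMMAS AND PROOFS =====

-- B's fold preserves the token-list length
lemma foldl_set_length (n : Int) (repl : List (Int × String)) (tokens : List String) :
    (repl.foldl (fun ts (p : Int × String) =>
        if 0 ≤ p.1 ∧ p.1 < n then ts.set p.1.toNat p.2 else ts) tokens).length = tokens.length := by
  induction repl generalizing tokens with
  | nil => rfl
  | cons p rest ih =>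
    simp only [List.foldl_cons]
    split_ifs <;> simp [ih]

-- element j of B's fold: the (unique) replacement for key j if present, else the original token
lemma foldl_set_getD (n : Int) (repl : List (Int × String)) (tokens : List String)
    (htn : (tokens.length : Int) = n)
    (hnd : (repl.map Prod.fst).Nodup) (j : Nat) (hj : j < tokens.length) :
    (repl.foldl (fun ts (p : Int × String) =>
        if 0 ≤ p.1 ∧ p.1 < n then ts.set p.1.toNat p.2 else ts) tokens).getD j "" =
      match repl.find? (fun p => p.1 == (j : Int)) with
      | some p => p.2
      | none => tokens.getD j "" := by
  induction repl generalizing tokens with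
  | nil => simp
  | cons p rest ih =>
    simp only [List.map_cons, List.nodup_cons] at hnd
    simp only [List.foldl_cons, List.find?_cons]
    by_cases hg : 0 ≤ p.1 ∧ p.1 < n
    · rw [if_pos hg]
      rw [ih (tokens.set p.1.toNat p.2) (by simpa using htn) hnd.2 (by simpa using hj)]
      by_cases hk : p.1 = (j : Int)
      · have hrest : rest.find? (fun q => q.1 == (j : Int)) = none := by
          rw [List.find?_eq_none]
          intro q hq hqj
          simp only [beq_iff_eq] at hqj
          exact hnd.1 (by rw [hk, ← hqj]; exact List.mem_map_of_mem hq)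
        have hk' : (p.1 == (j : Int)) = true := by simpa using hk
        rw [hrest, hk']
        have hjn : p.1.toNat = j := by omega
        simp [hjn, List.getD, hj]
      · have hk' : (p.1 == (j : Int)) = false := by simpa using hk
        rw [hk']
        have hne : p.1.toNat ≠ j := by omega
        cases hfind : rest.find? (fun q => q.1 == (j : Int)) with
        | some q => simp
        | none => simp [List.getD, List.getElem?_set_ne hne]
    · rw [if_neg hg]
      rw [ih tokens htn hnd.2 hj]
      have hk : (p.1 == (j : Int)) = false := by
        simp only [beq_eq_false_iff_ne, ne_eq]
        omega
      rw [hk]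

-- A's append-fold equals a map over the zipped list
lemma A_fold_eq_map {κ : Type} [BEq κ] (d : PySem.Dict κ String) (l : List (κ × String)) :
    l.foldl (fun acc ix =>
        if d.contains ix.1 = false then acc ++ [ix.2] else acc ++ [d.getD ix.1 ""]) [] =
      l.map (fun ix => if d.contains ix.1 = false then ix.2 else d.getD ix.1 "") := by
  have hbody : (fun (acc : List String) (ix : κ × String) =>
      if d.contains ix.1 = false then acc ++ [ix.2] else acc ++ [d.getD ix.1 ""]) =
      fun acc ix => acc ++ [if d.contains ix.1 = false then ix.2 else d.getD ix.1 ""] := by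
    funext acc ix
    split_ifs <;> rfl
  rw [hbody, PySem.List.foldl_append_singleton_eq_map]
  rfl

-- the two post-loop token lists are equal
lemma lists_eq (repl : List (Int × String)) (tokens : List String)
    (hnd : (repl.map Prod.fst).Nodup) :
    ((PySem.List.pyRange 0 (tokens.length : Int) 1).zip tokens).map
        (fun ix => if (PySem.Dict.mk repl).contains ix.1 = false then ix.2
                   else (PySem.Dict.mk repl).getD ix.1 "") =
      repl.foldl (fun ts (p : Int × String) =>
        if 0 ≤ p.1 ∧ p.1 < (tokens.length : Int) then ts.set p.1.toNat p.2 else ts) tokens := by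
  apply List.ext_getElem
  · simp [PySem.List.pyRange_zero_natCast, foldl_set_length]
  · intro j h1 h2
    have hj : j < tokens.length := by
      rwa [foldl_set_length] at h2
    have hB := foldl_set_getD (tokens.length : Int) repl tokens rfl hnd j hj
    rw [List.getD_eq_getElem _ _ h2] at hB
    rw [hB]
    simp only [List.getElem_map, List.getElem_zip, PySem.List.pyRange_zero_natCast,
      List.getElem_range]
    simp only [PySem.Dict.contains, PySem.Dict.getD, PySem.Dict.get?]
    cases hf : repl.find? (fun p => p.1 == (j : Int)) with
    | none =>
      have hany : (repl.any (fun p => p.1 == (j : Int))) = false := by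
        rw [List.any_eq_false]
        intro p hp
        have := List.find?_eq_none.mp hf p hp
        simpa using this
      simp [hany, List.getElem?_eq_getElem hj]
    | some q =>
      have hq := List.find?_some hf
      have hqm := List.mem_of_find?_eq_some hf
      have hany : (repl.any (fun p => p.1 == (j : Int))) = true := by
        rw [List.any_eq_true]
        exact ⟨q, hqm, hq⟩
      simp [hany]

-- ===== VERDICT (by name: the statement is the Claim_ definition above) =====
theorem common_token_spec : Claim_equal_common_token := by
  intro row replace hdom hpre
  obtain ⟨h1, h2, h3⟩ := hpre
  unfold Spec_common_token common_token common_token_alt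
  obtain ⟨ev, hev⟩ : ∃ ev, (PySem.Dict.mk row).get? "tokenized event" = some ev := by
    rw [PySem.Dict.contains_eq_isSome_get?] at h1
    cases h : (PySem.Dict.mk row).get? "tokenized event" with
    | none => rw [h] at h1; simp at h1
    | some v => exact ⟨v, rfl⟩
  obtain ⟨t, ht⟩ : ∃ t, (PySem.Dict.mk row).get? "template" = some t := by
    rw [PySem.Dict.contains_eq_isSome_get?] at h2
    cases h : (PySem.Dict.mk row).get? "template" with
    | none => rw [h] at h2; simp at h2
    | some v => exact ⟨v, rfl⟩
  have hgetD : (PySem.Dict.mk row).getD "template" "" = t :=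
    PySem.Dict.getD_of_get?_eq_some (PySem.Dict.mk row) "" ht
  dsimp only
  rw [hev, ht]
  dsimp only
  by_cases hte : t = ""
  · simp [hte]
  · rw [if_neg hte, if_neg hte]
    rw [hgetD] at h3
    rcases h3 with h3 | ⟨hc, hnd⟩
    · exact absurd h3 hte
    · obtain ⟨repl, hrepl⟩ : ∃ repl, (PySem.Dict.mk replace).get? t = some repl := by
        rw [PySem.Dict.contains_eq_isSome_get?] at hc
        cases h : (PySem.Dict.mk replace).get? t with
        | none => rw [h] at hc; simp at hc
        | some v => exact ⟨v, rfl⟩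
      have hgrepl : (PySem.Dict.mk replace).getD t [] = repl :=
        PySem.Dict.getD_of_get?_eq_some (PySem.Dict.mk replace) [] hrepl
      rw [hgrepl] at hnd
      rw [hrepl]
      dsimp only
      apply congrArg (PySem.Str.join " ")
      rw [A_fold_eq_map]
      exact lists_eq repl ((PySem.Str.split? ev " ").getD []) hnd
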